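-- pv_equiv track=rewrite | github.com/vlaxcs/FMI-INFO-S15-2024-2027 | Anul I - Licenta/Semestrul I/Programarea Algoritmilor/Seminare/Seminarul 3/PP04. Numere/numere.py | Method2
-- ===== SOURCE A (Python) =====
-- def Method2(digits): # Dictionar de frecventa
--     frequency = {chr(x + 48): digits.count(chr(x+48)) for x in range(0, 10)}
--
--     maxNumber = [key * frequency[key] for key in sorted(frequency.keys(), reverse = True) if frequency[key]]
--     maxNumber = int("".join(maxNumber))
--
--     minNumber = []
--     for key in frequency:
--         if key != '0' and frequency[key]:
--             minNumber = [key]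
--             frequency[key] -= 1
--             break
--
--     for key in frequency:
--         minNumber += [key] * max(frequency[key], 0)
--
--     minNumber = int("".join(minNumber))
--
--     return minNumber, maxNumber
-- ===== SOURCE B (Python) =====
-- def Method2(digits):
--     L = sorted(c for c in digits if c in "0123456789")
--     maxNumber = int("".join(reversed(L)))
--     for i, c in enumerate(L):
--         if c != '0':
--             minNumber = int(c + "".join(L[:i] + L[i + 1:]))
--             break
--     else:
--         minNumber = int("".join(L))
--     return minNumber, maxNumber
-- ===== Notes on version B (the rewrite author's own statement) =====
-- stated objective: simpler
-- what changed: B sorts the filtered digit characters once and moves the first nonzero digit to the front, replacing A's frequency dictionary built from ten per-digit counting passes and its two dictionary-iteration loops.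
-- outside the precondition, e.g. on Method2(''): A raises ValueError, B raises ValueError
import Mathlib
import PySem

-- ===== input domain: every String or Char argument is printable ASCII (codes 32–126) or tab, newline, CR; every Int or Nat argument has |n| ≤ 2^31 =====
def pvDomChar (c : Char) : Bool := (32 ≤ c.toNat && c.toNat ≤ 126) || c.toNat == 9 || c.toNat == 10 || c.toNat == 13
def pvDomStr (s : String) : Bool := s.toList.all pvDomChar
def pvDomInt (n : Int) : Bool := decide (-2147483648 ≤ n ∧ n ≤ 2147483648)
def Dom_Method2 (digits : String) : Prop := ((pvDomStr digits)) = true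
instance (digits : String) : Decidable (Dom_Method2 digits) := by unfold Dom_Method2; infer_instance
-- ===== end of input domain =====

-- B sorts the digit characters once and moves the first nonzero digit to the front, instead of
-- A's frequency dictionary with per-digit counting passes; same return value on every input with
-- at least one digit character (elsewhere both raise ValueError).

-- ===== PORT A =====
def pvKeys : List Char := (PySem.List.pyRange 0 10 1).map (fun x => Char.ofNat (x + 48).toNat)

def pvFreq (digits : String) : PySem.Dict Char Int :=
  pvKeys.foldl (fun d k => d.insert k (PySem.Str.count digits (String.ofList [k]) : Int)) PySem.Dict.empty

def pvFindFirst (freq : PySem.Dict Char Int) : List Char → Option Char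
  | [] => none
  | k :: rest => if k != '0' && freq.getD k 0 != 0 then some k else pvFindFirst freq rest

def Method2 (digits : String) : Int × Int :=
  let frequency := pvFreq digits
  let maxList := ((PySem.List.sorted frequency.keys (fun k => k) true).filter
      (fun k => frequency.getD k 0 != 0)).map (fun k => PySem.List.pyRepeat [k] (frequency.getD k 0))
  let maxNumber := (PySem.Int.ofChars? maxList.flatten).getD 0
  let st :=
    match pvFindFirst frequency frequency.keys with
    | some k => ([k], frequency.insert k (frequency.getD k 0 - 1))
    | none => (([] : List Char), frequency)
  let minList := st.2.keys.foldl
      (fun acc k => acc ++ PySem.List.pyRepeat [k] (max (st.2.getD k 0) 0)) st.1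
  let minNumber := (PySem.Int.ofChars? minList).getD 0
  (minNumber, maxNumber)

-- ===== PORT B =====
def pvDig (c : Char) : Bool := PySem.Chars.isIn [c] "0123456789".toList

def Method2_alt (digits : String) : Int × Int :=
  let L := PySem.List.sorted (digits.toList.filter pvDig) (fun c => c) false
  let maxNumber := (PySem.Int.ofChars? L.reverse).getD 0
  let minNumber :=
    match L.findIdx? (fun c => c != '0') with
    | some i => (PySem.Int.ofChars? (L.getD i ' ' :: (L.take i ++ L.drop (i + 1)))).getD 0
    | none => (PySem.Int.ofChars? L).getD 0
  (minNumber, maxNumber)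

-- ===== PRECONDITION & SPEC =====
-- Pre_ excludes exactly the inputs with no digit character, on which Python's int("") raises
-- ValueError in both A and B.
def Pre_Method2 (digits : String) : Prop :=
  (digits.toList.any (fun c => decide ('0' ≤ c ∧ c ≤ '9'))) = true
instance (digits : String) : Decidable (Pre_Method2 digits) := by unfold Pre_Method2; infer_instance
def pvWitness_Method2 : String := "2071a"
def Spec_Method2 (digits : String) (out : Int × Int) : Prop := out = Method2_alt digits
instance (digits : String) (out : Int × Int) : Decidable (Spec_Method2 digits out) := by
  unfold Spec_Method2; infer_instance

-- ===== CLAIM (what is proved, stated in full; the proofs are below) =====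
def Claim_equal_Method2 : Prop :=
  ∀ (digits : String), Dom_Method2 digits → Pre_Method2 digits → Spec_Method2 digits (Method2 digits)

-- ===== LEMMAS AND PROOFS =====
def cnt (digits : String) (d : Char) : Nat := digits.toList.count d

lemma countGo_single (c : Char) (l : List Char) (acc fuel : Nat) (h : l.length ≤ fuel) :
    PySem.Chars.count.go [c] fuel l acc = acc + l.count c := by
  induction l generalizing acc fuel with
  | nil => cases fuel <;> simp [PySem.Chars.count.go]
  | cons a t ih =>
      cases fuel with
      | zero => simp at h
      | succ n =>
        simp only [PySem.Chars.count.go, List.isPrefixOf, List.length] at *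
        by_cases hac : c = a
        · subst hac
          rw [if_pos (by simp)]
          simp only [Nat.zero_add, List.drop_succ_cons, List.drop_zero, List.count_cons_self]
          rw [ih (acc + 1) n (by omega)]
          omega
        · rw [if_neg (by simp [hac]), List.count_cons_of_ne (Ne.symm hac)]
          exact ih acc n (by omega)

lemma strcount (digits : String) (c : Char) :
    PySem.Chars.count digits.toList [c] = cnt digits c := by
  simp [PySem.Chars.count, cnt]
  rw [countGo_single c _ 0 _ (by simp)]
  simp

lemma pvKeys_eq : pvKeys = ['0','1','2','3','4','5','6','7','8','9'] := by decide

def litFreq (digits : String) : PySem.Dict Char Int :=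
  PySem.Dict.mk [('0', (cnt digits '0' : Int)), ('1', (cnt digits '1' : Int)),
    ('2', (cnt digits '2' : Int)), ('3', (cnt digits '3' : Int)), ('4', (cnt digits '4' : Int)),
    ('5', (cnt digits '5' : Int)), ('6', (cnt digits '6' : Int)), ('7', (cnt digits '7' : Int)),
    ('8', (cnt digits '8' : Int)), ('9', (cnt digits '9' : Int))]

lemma freq_eq (digits : String) : pvFreq digits = litFreq digits := by
  rw [litFreq]
  simp [pvFreq, pvKeys_eq, List.foldl, PySem.Dict.insert, PySem.Dict.contains, PySem.Dict.empty, strcount]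

def rep (n : Nat) (d : Char) : List Char := List.replicate n d

def Rlist (digits : String) : List Char :=
  rep (cnt digits '0') '0' ++ rep (cnt digits '1') '1' ++ rep (cnt digits '2') '2' ++
  rep (cnt digits '3') '3' ++ rep (cnt digits '4') '4' ++ rep (cnt digits '5') '5' ++
  rep (cnt digits '6') '6' ++ rep (cnt digits '7') '7' ++ rep (cnt digits '8') '8' ++
  rep (cnt digits '9') '9'

lemma pvDig_iff (c : Char) : pvDig c = true ↔ c ∈ ['0','1','2','3','4','5','6','7','8','9'] := by
  rw [pvDig, PySem.Chars.isIn_iff_infix]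
  constructor
  · intro h
    have := h.subset (List.mem_singleton_self c)
    simpa using this
  · intro h
    fin_cases h <;> decide

lemma Rlist_pairwise (digits : String) : (Rlist digits).Pairwise (· ≤ ·) := by
  simp [Rlist, rep, List.pairwise_append, List.mem_replicate, List.pairwise_replicate]
  repeat' apply And.intro
  all_goals intro _ b hb
  all_goals repeat' rcases hb with ⟨-, rfl⟩ | hb
  all_goals try obtain ⟨-, rfl⟩ := hb
  all_goals decide

lemma Rlist_perm (digits : String) : (Rlist digits).Perm (digits.toList.filter pvDig) := by
  rw [List.perm_iff_count]
  intro a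
  by_cases h : a ∈ ['0','1','2','3','4','5','6','7','8','9']
  · fin_cases h <;> rw [List.count_filter (by decide)] <;>
      simp [Rlist, rep, List.count_append, List.count_replicate, cnt]
  · have h0 : List.count a (digits.toList.filter pvDig) = 0 :=
      List.count_eq_zero.mpr (fun hc => absurd ((pvDig_iff a).mp (List.of_mem_filter hc)) h)
    rw [h0]
    simp only [Rlist, rep, List.count_append, List.count_replicate]
    simp at h
    simp only [beq_iff_eq]
    rw [if_neg (fun he => h.1 he.symm), if_neg (fun he => h.2.1 he.symm),
      if_neg (fun he => h.2.2.1 he.symm), if_neg (fun he => h.2.2.2.1 he.symm),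
      if_neg (fun he => h.2.2.2.2.1 he.symm), if_neg (fun he => h.2.2.2.2.2.1 he.symm),
      if_neg (fun he => h.2.2.2.2.2.2.1 he.symm), if_neg (fun he => h.2.2.2.2.2.2.2.1 he.symm),
      if_neg (fun he => h.2.2.2.2.2.2.2.2.1 he.symm), if_neg (fun he => h.2.2.2.2.2.2.2.2.2 he.symm)]

lemma sortedL (digits : String) :
    PySem.List.sorted (digits.toList.filter pvDig) (fun c => c) false = Rlist digits := by
  exact PySem.List.sorted_id_eq_of_perm_of_pairwise _ _ (Rlist_perm digits) (Rlist_pairwise digits)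

lemma findIdx?_rep_none {p : Char → Bool} {a : Char} (n : Nat) (h : p a = false) :
    List.findIdx? p (List.replicate n a) = none := by
  induction n with
  | zero => rfl
  | succ k ih => simp [List.replicate_succ, List.findIdx?_cons, h, ih]

lemma flatten_map_filter {α β : Type} (p : α → Bool) (f : α → List β) (l : List α)
    (h : ∀ x ∈ l, p x = false → f x = []) :
    ((l.filter p).map f).flatten = (l.map f).flatten := by
  induction l with
  | nil => rfl
  | cons a t ih =>
      by_cases hp : p a
      · simp [List.filter_cons, hp, ih (fun x hx => h x (List.mem_cons_of_mem a hx))]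
      · simp only [Bool.not_eq_true] at hp
        simp [List.filter_cons, hp, h a (List.mem_cons_self) hp,
          ih (fun x hx => h x (List.mem_cons_of_mem a hx))]


lemma pyRepHelp1 (c : Nat) (a : Char) :
    PySem.List.pyRepeat [a] (max ((c : Int)) 0) = List.replicate c a := by
  rw [PySem.List.pyRepeat_singleton]; congr 1; omega

lemma pyRepHelp2 (m : Nat) (a : Char) :
    PySem.List.pyRepeat [a] (max ((((m + 1 : Nat)) : Int) - 1) 0) = List.replicate m a := by
  rw [PySem.List.pyRepeat_singleton]; congr 1; omega

lemma getD_mid (n : Nat) (a b : Char) (T : List Char) :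
    (List.replicate n a ++ b :: T).getD n ' ' = b := by
  rw [List.getD_append_right _ _ _ _ (by simp)]; simp

lemma take_mid (n : Nat) (a b : Char) (T : List Char) :
    (List.replicate n a ++ b :: T).take n = List.replicate n a := List.take_left' (by simp)

lemma drop_mid (n : Nat) (a b : Char) (T : List Char) :
    (List.replicate n a ++ b :: T).drop (n + 1) = T := by
  rw [List.append_cons, List.drop_left' (by simp)]

lemma findIdx_mid {p : Char → Bool} (n : Nat) {a b : Char} {T : List Char}
    (ha : p a = false) (hb : p b = true) :
    List.findIdx? p (List.replicate n a ++ b :: T) = some n := by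
  rw [List.findIdx?_append, findIdx?_rep_none n ha]
  simp [List.findIdx?_cons, hb]

theorem AB (digits : String) : Method2 digits = Method2_alt digits := by
  rw [Method2, Method2_alt, freq_eq, sortedL]
  simp only [PySem.Dict.keys_mk, List.map, Prod.mk.injEq]
  constructor
  · -- min component
    by_cases h1 : cnt digits '1' = 0
    · by_cases h2 : cnt digits '2' = 0
      · by_cases h3 : cnt digits '3' = 0
        · by_cases h4 : cnt digits '4' = 0
          · by_cases h5 : cnt digits '5' = 0
            · by_cases h6 : cnt digits '6' = 0
              · by_cases h7 : cnt digits '7' = 0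
                · by_cases h8 : cnt digits '8' = 0
                  · by_cases h9 : cnt digits '9' = 0
                    · rw [show pvFindFirst (litFreq digits) (litFreq digits).keys = none from by
                            simp [pvFindFirst, litFreq, PySem.Dict.getD, PySem.Dict.get?_mk_cons, h1, h2, h3, h4, h5, h6, h7, h8, h9]]
                      rw [Rlist]
                      simp only [rep, h1, h2, h3, h4, h5, h6, h7, h8, h9, List.replicate_zero, List.append_nil, List.nil_append]
                      rw [findIdx?_rep_none _ (by decide)]
                      simp [litFreq, PySem.Dict.keys_mk, PySem.List.foldl_append_eq_flatMap, PySem.Dict.getD,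
                        PySem.Dict.get?_mk_cons, pyRepHelp1, h1, h2, h3, h4, h5, h6, h7, h8, h9]
                    · obtain ⟨m, hm⟩ := Nat.exists_eq_succ_of_ne_zero h9
                      rw [show pvFindFirst (litFreq digits) (litFreq digits).keys = some '9' from by
                            simp [pvFindFirst, litFreq, PySem.Dict.getD, PySem.Dict.get?_mk_cons, h1, h2, h3, h4, h5, h6, h7, h8, h9]]
                      rw [Rlist]
                      simp only [rep, hm, h1, h2, h3, h4, h5, h6, h7, h8, List.replicate_zero, List.replicate_succ, List.nil_append,
                        List.cons_append, List.append_assoc]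
                      rw [findIdx_mid _ (by decide) (by decide)]
                      simp [litFreq, PySem.Dict.insert, PySem.Dict.contains, PySem.Dict.getD,
                        PySem.Dict.get?_mk_cons, PySem.Dict.keys_mk, PySem.List.foldl_append_eq_flatMap,
                        pyRepHelp1, pyRepHelp2, hm, h1, h2, h3, h4, h5, h6, h7, h8, getD_mid, take_mid, drop_mid, List.append_assoc]
                  · obtain ⟨m, hm⟩ := Nat.exists_eq_succ_of_ne_zero h8
                    rw [show pvFindFirst (litFreq digits) (litFreq digits).keys = some '8' from by
                          simp [pvFindFirst, litFreq, PySem.Dict.getD, PySem.Dict.get?_mk_cons, h1, h2, h3, h4, h5, h6, h7, h8]]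
                    rw [Rlist]
                    simp only [rep, hm, h1, h2, h3, h4, h5, h6, h7, List.replicate_zero, List.replicate_succ, List.nil_append,
                      List.cons_append, List.append_assoc]
                    rw [findIdx_mid _ (by decide) (by decide)]
                    simp [litFreq, PySem.Dict.insert, PySem.Dict.contains, PySem.Dict.getD,
                      PySem.Dict.get?_mk_cons, PySem.Dict.keys_mk, PySem.List.foldl_append_eq_flatMap,
                      pyRepHelp1, pyRepHelp2, hm, h1, h2, h3, h4, h5, h6, h7, getD_mid, take_mid, drop_mid, List.append_assoc]
                · obtain ⟨m, hm⟩ := Nat.exists_eq_succ_of_ne_zero h7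
                  rw [show pvFindFirst (litFreq digits) (litFreq digits).keys = some '7' from by
                        simp [pvFindFirst, litFreq, PySem.Dict.getD, PySem.Dict.get?_mk_cons, h1, h2, h3, h4, h5, h6, h7]]
                  rw [Rlist]
                  simp only [rep, hm, h1, h2, h3, h4, h5, h6, List.replicate_zero, List.replicate_succ, List.nil_append,
                    List.cons_append, List.append_assoc]
                  rw [findIdx_mid _ (by decide) (by decide)]
                  simp [litFreq, PySem.Dict.insert, PySem.Dict.contains, PySem.Dict.getD,
                    PySem.Dict.get?_mk_cons, PySem.Dict.keys_mk, PySem.List.foldl_append_eq_flatMap,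
                    pyRepHelp1, pyRepHelp2, hm, h1, h2, h3, h4, h5, h6, getD_mid, take_mid, drop_mid, List.append_assoc]
              · obtain ⟨m, hm⟩ := Nat.exists_eq_succ_of_ne_zero h6
                rw [show pvFindFirst (litFreq digits) (litFreq digits).keys = some '6' from by
                      simp [pvFindFirst, litFreq, PySem.Dict.getD, PySem.Dict.get?_mk_cons, h1, h2, h3, h4, h5, h6]]
                rw [Rlist]
                simp only [rep, hm, h1, h2, h3, h4, h5, List.replicate_zero, List.replicate_succ, List.nil_append,
                  List.cons_append, List.append_assoc]
                rw [findIdx_mid _ (by decide) (by decide)]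
                simp [litFreq, PySem.Dict.insert, PySem.Dict.contains, PySem.Dict.getD,
                  PySem.Dict.get?_mk_cons, PySem.Dict.keys_mk, PySem.List.foldl_append_eq_flatMap,
                  pyRepHelp1, pyRepHelp2, hm, h1, h2, h3, h4, h5, getD_mid, take_mid, drop_mid, List.append_assoc]
            · obtain ⟨m, hm⟩ := Nat.exists_eq_succ_of_ne_zero h5
              rw [show pvFindFirst (litFreq digits) (litFreq digits).keys = some '5' from by
                    simp [pvFindFirst, litFreq, PySem.Dict.getD, PySem.Dict.get?_mk_cons, h1, h2, h3, h4, h5]]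
              rw [Rlist]
              simp only [rep, hm, h1, h2, h3, h4, List.replicate_zero, List.replicate_succ, List.nil_append,
                List.cons_append, List.append_assoc]
              rw [findIdx_mid _ (by decide) (by decide)]
              simp [litFreq, PySem.Dict.insert, PySem.Dict.contains, PySem.Dict.getD,
                PySem.Dict.get?_mk_cons, PySem.Dict.keys_mk, PySem.List.foldl_append_eq_flatMap,
                pyRepHelp1, pyRepHelp2, hm, h1, h2, h3, h4, getD_mid, take_mid, drop_mid, List.append_assoc]
          · obtain ⟨m, hm⟩ := Nat.exists_eq_succ_of_ne_zero h4
            rw [show pvFindFirst (litFreq digits) (litFreq digits).keys = some '4' from by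
                  simp [pvFindFirst, litFreq, PySem.Dict.getD, PySem.Dict.get?_mk_cons, h1, h2, h3, h4]]
            rw [Rlist]
            simp only [rep, hm, h1, h2, h3, List.replicate_zero, List.replicate_succ, List.nil_append,
              List.cons_append, List.append_assoc]
            rw [findIdx_mid _ (by decide) (by decide)]
            simp [litFreq, PySem.Dict.insert, PySem.Dict.contains, PySem.Dict.getD,
              PySem.Dict.get?_mk_cons, PySem.Dict.keys_mk, PySem.List.foldl_append_eq_flatMap,
              pyRepHelp1, pyRepHelp2, hm, h1, h2, h3, getD_mid, take_mid, drop_mid, List.append_assoc]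
        · obtain ⟨m, hm⟩ := Nat.exists_eq_succ_of_ne_zero h3
          rw [show pvFindFirst (litFreq digits) (litFreq digits).keys = some '3' from by
                simp [pvFindFirst, litFreq, PySem.Dict.getD, PySem.Dict.get?_mk_cons, h1, h2, h3]]
          rw [Rlist]
          simp only [rep, hm, h1, h2, List.replicate_zero, List.replicate_succ, List.nil_append,
            List.cons_append, List.append_assoc]
          rw [findIdx_mid _ (by decide) (by decide)]
          simp [litFreq, PySem.Dict.insert, PySem.Dict.contains, PySem.Dict.getD,
            PySem.Dict.get?_mk_cons, PySem.Dict.keys_mk, PySem.List.foldl_append_eq_flatMap,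
            pyRepHelp1, pyRepHelp2, hm, h1, h2, getD_mid, take_mid, drop_mid, List.append_assoc]
      · obtain ⟨m, hm⟩ := Nat.exists_eq_succ_of_ne_zero h2
        rw [show pvFindFirst (litFreq digits) (litFreq digits).keys = some '2' from by
              simp [pvFindFirst, litFreq, PySem.Dict.getD, PySem.Dict.get?_mk_cons, h1, h2]]
        rw [Rlist]
        simp only [rep, hm, h1, List.replicate_zero, List.replicate_succ, List.nil_append,
          List.cons_append, List.append_assoc]
        rw [findIdx_mid _ (by decide) (by decide)]
        simp [litFreq, PySem.Dict.insert, PySem.Dict.contains, PySem.Dict.getD,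
          PySem.Dict.get?_mk_cons, PySem.Dict.keys_mk, PySem.List.foldl_append_eq_flatMap,
          pyRepHelp1, pyRepHelp2, hm, h1, getD_mid, take_mid, drop_mid, List.append_assoc]
    · obtain ⟨m, hm⟩ := Nat.exists_eq_succ_of_ne_zero h1
      rw [show pvFindFirst (litFreq digits) (litFreq digits).keys = some '1' from by
            simp [pvFindFirst, litFreq, PySem.Dict.getD, PySem.Dict.get?_mk_cons, h1]]
      rw [Rlist]
      simp only [rep, hm, List.replicate_zero, List.replicate_succ, List.nil_append,
        List.cons_append, List.append_assoc]
      rw [findIdx_mid _ (by decide) (by decide)]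
      simp [litFreq, PySem.Dict.insert, PySem.Dict.contains, PySem.Dict.getD,
        PySem.Dict.get?_mk_cons, PySem.Dict.keys_mk, PySem.List.foldl_append_eq_flatMap,
        pyRepHelp1, pyRepHelp2, hm, getD_mid, take_mid, drop_mid, List.append_assoc]
  · -- max component
    rw [show (litFreq digits).keys = ['0','1','2','3','4','5','6','7','8','9'] from by
      simp [litFreq, PySem.Dict.keys_mk]]
    rw [show PySem.List.sorted ['0','1','2','3','4','5','6','7','8','9'] (fun k => k) true
        = ['9','8','7','6','5','4','3','2','1','0'] from by decide]
    rw [flatten_map_filter _ _ _ (by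
      intro x hx hp
      fin_cases hx <;>
        simp_all [PySem.Dict.getD, PySem.Dict.get?_mk_cons, PySem.List.pyRepeat_singleton])]
    simp [litFreq, PySem.Dict.getD, PySem.Dict.get?_mk_cons, PySem.List.pyRepeat_singleton,
      Rlist, rep, List.reverse_replicate]

-- ===== VERDICT (by name: the statement is the Claim_ definition above) =====
theorem Method2_spec : Claim_equal_Method2 := by
  unfold Claim_equal_Method2 Spec_Method2
  intro digits _ _
  exact AB digits
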